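-- pv_equiv track=rewrite | github.com/leeyounwoo/Algorithm | In SSAFY/0930/deu03093/1242_암호코드스캔/s1.py | find_code_i
-- ===== SOURCE A (Python) =====
-- def find_code_i(codes):
--     code_i_j_list = []
--     for i in range(len(codes)):
--         flag = False
--         for j in range(len(codes[i])-1, -1, -1):
--             # '0'이 아닌 값을 만나지 못했을 때
--             if not flag:
--                 if codes[i][j] != '0':
--                     flag = True
--                     code_i_j_list.append((i, j))
--             else:
--                 if codes[i][j] == '0':
--                     flag = False
--     return code_i_j_list
-- ===== SOURCE B (Python) =====
-- def find_code_i(codes):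
--     out = []
--     for i, row in enumerate(codes):
--         n = len(row)
--         ends = [j for j in range(n)
--                 if row[j] != '0' and (j + 1 == n or row[j + 1] == '0')]
--         out.extend((i, j) for j in reversed(ends))
--     return out
-- ===== Notes on version B (the rewrite author's own statement) =====
-- stated objective: idiomatic
-- what changed: Replaces A's stateful right-to-left flag scan with a stateless left-to-right run-end detection (row[j] != '0' and its right neighbour is '0' or absent), collected ascending and reversed per row.
import Mathlib
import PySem

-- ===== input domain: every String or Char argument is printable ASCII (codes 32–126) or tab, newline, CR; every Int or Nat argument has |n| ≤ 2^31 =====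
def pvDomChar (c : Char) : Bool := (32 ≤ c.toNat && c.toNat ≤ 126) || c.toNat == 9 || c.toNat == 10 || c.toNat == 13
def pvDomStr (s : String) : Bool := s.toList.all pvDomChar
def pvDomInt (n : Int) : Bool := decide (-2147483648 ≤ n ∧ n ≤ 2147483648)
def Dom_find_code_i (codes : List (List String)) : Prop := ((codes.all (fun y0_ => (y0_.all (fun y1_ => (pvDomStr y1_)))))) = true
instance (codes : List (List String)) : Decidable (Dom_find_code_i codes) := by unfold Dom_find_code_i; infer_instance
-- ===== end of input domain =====

-- B replaces A's stateful right-to-left flag scan with a stateless left-to-right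
-- run-end test per index, collected ascending and reversed per row (objective: idiomatic).

-- ===== PORT A =====
def find_code_i (codes : List (List String)) : List (Int × Int) :=
  (PySem.List.pyRange 0 (codes.length : Int) 1).foldl (fun code_i_j_list i =>
    ((PySem.List.pyRange (((PySem.List.pyGetD codes i []).length : Int) - 1) (-1) (-1)).foldl
      (fun (st : Bool × List (Int × Int)) j =>
        if !st.1 then
          if PySem.List.pyGetD (PySem.List.pyGetD codes i []) j "" ≠ "0" then
            (true, st.2 ++ [(i, j)])
          else st
        else
          if PySem.List.pyGetD (PySem.List.pyGetD codes i []) j "" = "0" then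
            (false, st.2)
          else st)
      (false, code_i_j_list)).2) []

-- ===== PORT B =====
def find_code_i_alt (codes : List (List String)) : List (Int × Int) :=
  (PySem.List.enumerate codes).foldl (fun out p =>
    let n : Int := (p.2.length : Int)
    let ends := (PySem.List.pyRange 0 n 1).filter (fun j =>
      (PySem.List.pyGetD p.2 j "" != "0") &&
      (decide (j + 1 = n) || (PySem.List.pyGetD p.2 (j + 1) "" == "0")))
    out ++ ends.reverse.map (fun j => (p.1, j))) []

-- ===== PRECONDITION & SPEC =====
def Spec_find_code_i (codes : List (List String)) (out : List (Int × Int)) : Prop := out = find_code_i_alt codes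
instance (codes : List (List String)) (out : List (Int × Int)) : Decidable (Spec_find_code_i codes out) := by unfold Spec_find_code_i; infer_instance

-- ===== CLAIM (what is proved, stated in full; the proofs are below) =====
def Claim_equal_find_code_i : Prop := ∀ (codes : List (List String)), Dom_find_code_i codes → Spec_find_code_i codes (find_code_i codes)

-- ===== LEMMAS AND PROOFS =====

-- The left-to-right run-end condition B uses, over Nat indices.
def condB (row : List String) (k : Nat) : Bool :=
  (row[k]?.getD "" != "0") && (decide (k + 1 = row.length) || (row[k + 1]?.getD "" == "0"))

-- A's flag after its right-to-left scan has processed all indices ≥ m.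
def flagAt (row : List String) (m : Nat) : Bool :=
  decide (m < row.length) && (row[m]?.getD "" != "0")

-- The pairs one row contributes, in A's (descending-j) order.
def blockRow (row : List String) (i : Int) : List (Int × Int) :=
  ((List.range row.length).filter (condB row)).reverse.map (fun k : Nat => (i, (k : Int)))

-- Invariant of A's inner loop: scanning indices m-1 … 0 starting with flag = flagAt row m
-- appends exactly the run-end indices below m, in descending order.
lemma rowA (row : List String) (i : Int) :
    ∀ (m : Nat), m ≤ row.length → ∀ (acc : List (Int × Int)),
      (PySem.List.pyRange ((m : Int) - 1) (-1) (-1)).foldl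
        (fun (st : Bool × List (Int × Int)) j =>
          if !st.1 then
            if PySem.List.pyGetD row j "" ≠ "0" then (true, st.2 ++ [(i, j)]) else st
          else
            if PySem.List.pyGetD row j "" = "0" then (false, st.2) else st)
        (flagAt row m, acc)
      = (flagAt row 0, acc ++ ((List.range m).filter (condB row)).reverse.map (fun k : Nat => (i, (k : Int)))) := by
  intro m
  induction m with
  | zero =>
      intro _ acc
      rw [show ((0 : Nat) : Int) - 1 = -1 by simp, PySem.List.pyRange_neg_one_eq_nil le_rfl]
      simp
  | succ m ih =>
      intro hm acc
      have hmlt : m < row.length := hm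
      rw [show ((m + 1 : Nat) : Int) - 1 = (m : Int) by push_cast; ring,
          PySem.List.pyRange_neg_one_cons (by omega : (-1 : Int) < (m : Int))]
      simp only [List.foldl_cons, PySem.List.pyGetD_natCast, List.getD_eq_getElem?_getD]
      by_cases h0 : row[m]?.getD "" = "0"
      · have hcond : condB row m = false := by simp [condB, h0]
        have ihs := ih (Nat.le_of_succ_le hm) acc
        rw [show flagAt row m = false by simp [flagAt, h0]] at ihs
        by_cases hf1 : flagAt row (m + 1) = true
        · simp only [hf1, h0, Bool.not_true, Bool.false_eq_true, ne_eq, not_true_eq_false, reduceIte] at ihs ⊢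
          rw [ihs]
          simp [List.range_succ, hcond]
        · rw [Bool.not_eq_true] at hf1
          simp only [hf1, h0, Bool.not_false, ne_eq, not_true_eq_false, reduceIte] at ihs ⊢
          rw [ihs]
          simp [List.range_succ, hcond]
      · by_cases hf1 : flagAt row (m + 1) = true
        · have hf1' := hf1
          simp only [flagAt, Bool.and_eq_true, decide_eq_true_eq, bne_iff_ne, ne_eq] at hf1'
          have hcond : condB row m = false := by
            simp [condB, hf1'.2, Nat.ne_of_lt hf1'.1]
          have h0' : ¬ row[m] = "0" := by
            rw [List.getElem?_eq_getElem hmlt] at h0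
            simpa using h0
          have ihs := ih (Nat.le_of_succ_le hm) acc
          rw [show flagAt row m = true by simp [flagAt, hmlt, h0']] at ihs
          simp only [hf1, h0, Bool.not_true, Bool.false_eq_true, ne_eq, not_false_eq_true, reduceIte] at ihs ⊢
          rw [ihs]
          simp [List.range_succ, hcond]
        · rw [Bool.not_eq_true] at hf1
          have hf1' := hf1
          simp only [flagAt, Bool.and_eq_false_iff, decide_eq_false_iff_not, Nat.not_lt,
            bne_eq_false_iff_eq] at hf1'
          have hcond : condB row m = true := by
            rcases Nat.lt_or_ge (m + 1) row.length with hlt | hge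
            · rcases hf1' with h | h
              · omega
              · simp [condB, h0, h]
            · have hEq : m + 1 = row.length := by omega
              simp [condB, h0, hEq]
          have h0' : ¬ row[m] = "0" := by
            rw [List.getElem?_eq_getElem hmlt] at h0
            simpa using h0
          have ihs := ih (Nat.le_of_succ_le hm) (acc ++ [(i, (m : Int))])
          rw [show flagAt row m = true by simp [flagAt, hmlt, h0']] at ihs
          simp only [hf1, h0, Bool.not_false, ne_eq, not_false_eq_true, reduceIte] at ihs ⊢
          rw [ihs]
          simp [List.range_succ, hcond, List.append_assoc]

-- A's inner loop on a whole row, started with flag = False, appends blockRow.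
lemma rowA_full (row : List String) (i : Int) (acc : List (Int × Int)) :
    ((PySem.List.pyRange ((row.length : Int) - 1) (-1) (-1)).foldl
      (fun (st : Bool × List (Int × Int)) j =>
        if !st.1 then
          if PySem.List.pyGetD row j "" ≠ "0" then (true, st.2 ++ [(i, j)]) else st
        else
          if PySem.List.pyGetD row j "" = "0" then (false, st.2) else st)
      (false, acc)).2 = acc ++ blockRow row i := by
  have h := rowA row i row.length le_rfl acc
  rw [show flagAt row row.length = false by simp [flagAt]] at h
  rw [h]
  simp [blockRow]

-- B's per-row run-end list equals blockRow.
lemma endsB (row : List String) (i : Int) :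
    ((PySem.List.pyRange 0 ((row.length : Int)) 1).filter (fun j =>
        (PySem.List.pyGetD row j "" != "0") &&
        (decide (j + 1 = ((row.length : Int))) || (PySem.List.pyGetD row (j + 1) "" == "0")))).reverse.map
      (fun j => (i, j)) = blockRow row i := by
  rw [PySem.List.pyRange_zero_nat, List.filter_map]
  have hpred : ((fun j : Int =>
        (PySem.List.pyGetD row j "" != "0") &&
        (decide (j + 1 = ((row.length : Int))) || (PySem.List.pyGetD row (j + 1) "" == "0")))
      ∘ (fun k : Nat => (k : Int))) = condB row := by
    funext k
    simp only [Function.comp_apply,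
      show ((k : Int) + 1) = (((k + 1 : Nat)) : Int) by push_cast; ring,
      PySem.List.pyGetD_natCast, Nat.cast_inj, List.getD_eq_getElem?_getD]
    rfl
  rw [hpred]
  simp [blockRow, List.map_reverse, List.map_map, Function.comp_def]

-- ===== VERDICT (by name: the statement is the Claim_ definition above) =====
theorem find_code_i_spec : Claim_equal_find_code_i := by
  intro codes _
  unfold Spec_find_code_i find_code_i find_code_i_alt
  rw [PySem.List.enumerate_eq_map_pyRange codes ([] : List String), List.foldl_map,
      PySem.List.len_eq]
  apply PySem.List.foldl_congr_mem
  intro acc i _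
  dsimp only
  rw [rowA_full (PySem.List.pyGetD codes i []) i acc, endsB (PySem.List.pyGetD codes i []) i]
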